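-- pv_equiv track=rewrite | github.com/petrvanblokland/TYPETR-Assistants | tnbits/model/toolbox/kerning/buildgroups.py | makeProfiles
-- ===== SOURCE A (Python) =====
-- def sortValues(d):
--     for k, v in d.items():
--         d[k] = tuple(sorted(v))
--
-- def makeProfiles(kerning):
--     """
--     NOTE: kerning must be flat!
--     """
--     firstProfiles = {}
--     secondProfiles = {}
--
--     for (first, second), value in kerning.items():
--         if first not in firstProfiles:
--             firstProfiles[first] = set()
--         firstProfiles[first].add((second, value))   # (oppositeGlyph, kernValue)
--         if second not in secondProfiles:
--             secondProfiles[second] = set()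
--         secondProfiles[second].add((first, value))  # (oppositeGlyph, kernValue)
--
--     sortValues(firstProfiles)
--     sortValues(secondProfiles)
--     return firstProfiles, secondProfiles
-- ===== SOURCE B (Python) =====
-- def _insertPair(pairs, p):
--     # insert p into the sorted tuple `pairs`, keeping it sorted and duplicate-free
--     for i, q in enumerate(pairs):
--         if q == p:
--             return pairs
--         if p < q:
--             return pairs[:i] + (p,) + pairs[i:]
--     return pairs + (p,)
--
-- def _profile(triples):
--     prof = {}
--     for a, b, v in triples:
--         prof[a] = _insertPair(prof.get(a, ()), (b, v))
--     return prof
--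
-- def makeProfiles(kerning):
--     triples = [(f, s, v) for (f, s), v in kerning.items()]
--     return _profile(triples), _profile([(s, f, v) for (f, s, v) in triples])
-- ===== Notes on version B (the rewrite author's own statement) =====
-- stated objective: alternative
-- what changed: A accumulates a per-key set of pairs and sorts every set afterwards; B never builds sets or sorts: a single generic per-key pass maintains each profile directly as a sorted duplicate-free tuple via ordered insertion, applied once to the triples and once to the swapped triples.
import Mathlib
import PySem

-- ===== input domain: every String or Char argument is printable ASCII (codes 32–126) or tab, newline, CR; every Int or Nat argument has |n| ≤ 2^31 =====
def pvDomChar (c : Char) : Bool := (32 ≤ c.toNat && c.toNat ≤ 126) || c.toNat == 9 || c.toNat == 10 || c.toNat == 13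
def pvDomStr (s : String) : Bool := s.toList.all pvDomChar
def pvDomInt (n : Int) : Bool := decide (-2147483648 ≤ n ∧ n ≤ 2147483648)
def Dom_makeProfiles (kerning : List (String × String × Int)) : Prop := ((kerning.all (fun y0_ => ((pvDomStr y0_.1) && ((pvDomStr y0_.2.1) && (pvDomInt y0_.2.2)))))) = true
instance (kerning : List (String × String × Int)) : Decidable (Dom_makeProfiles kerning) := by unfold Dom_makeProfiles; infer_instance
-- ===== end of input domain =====

-- B replaces A's per-key set accumulation plus final per-key sort by one generic per-key pass that
-- maintains each profile directly as a sorted duplicate-free list via ordered insertion (objective: alternative).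

-- ===== PORT A =====
-- sortValues(d): for k, v in d.items(): d[k] = tuple(sorted(v)) — rebinds every value in place,
-- keeping the key order: rendered as a map over the items (sorted over pairs = PySem.List.sorted2).
def sortValuesA (d : PySem.Dict String (PySem.Set (String × Int))) : PySem.Dict String (List (String × Int)) :=
  PySem.Dict.mk (d.items.map (fun kv => (kv.1, PySem.List.sorted2 kv.2 Prod.fst Prod.snd false)))

def makeProfiles (kerning : List (String × String × Int)) : (List (String × List (String × Int))) × (List (String × List (String × Int))) :=
  -- for (first, second), value in kerning.items(): 'if … not in …: … = set()' then '….add((…, value))'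
  let profiles := kerning.foldl
    (fun acc x =>
      ((if acc.1.contains x.1 then acc.1 else acc.1.insert x.1 PySem.Set.empty).modify
          x.1 PySem.Set.empty (fun s => PySem.Set.add s (x.2.1, x.2.2)),
       (if acc.2.contains x.2.1 then acc.2 else acc.2.insert x.2.1 PySem.Set.empty).modify
          x.2.1 PySem.Set.empty (fun s => PySem.Set.add s (x.1, x.2.2))))
    (PySem.Dict.empty, PySem.Dict.empty)
  ((sortValuesA profiles.1).items, (sortValuesA profiles.2).items)

-- ===== PORT B =====
-- p < q on pairs is Python's tuple comparison (lexicographic).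
def pairLt (p q : String × Int) : Bool :=
  decide (p.1 < q.1) || (p.1 == q.1 && decide (p.2 < q.2))

-- _insertPair: insert p into the sorted list, keeping it sorted and duplicate-free.
def insPair : List (String × Int) → (String × Int) → List (String × Int)
  | [], p => [p]
  | q :: t, p => if q == p then q :: t else if pairLt p q then p :: q :: t else q :: insPair t p

-- _profile: one pass, each key's profile kept sorted and duplicate-free at all times.
def profileB (triples : List (String × String × Int)) : PySem.Dict String (List (String × Int)) :=
  triples.foldl (fun d t => d.insert t.1 (insPair (d.getD t.1 []) (t.2.1, t.2.2))) PySem.Dict.empty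

def makeProfiles_alt (kerning : List (String × String × Int)) : (List (String × List (String × Int))) × (List (String × List (String × Int))) :=
  ((profileB kerning).items, (profileB (kerning.map (fun t => (t.2.1, t.1, t.2.2)))).items)

-- ===== PRECONDITION & SPEC =====
def Spec_makeProfiles (kerning : List (String × String × Int)) (out : (List (String × List (String × Int))) × (List (String × List (String × Int)))) : Prop := out = makeProfiles_alt kerning
instance (kerning : List (String × String × Int)) (out : (List (String × List (String × Int))) × (List (String × List (String × Int)))) : Decidable (Spec_makeProfiles kerning out) := by unfold Spec_makeProfiles; infer_instance

-- ===== CLAIM (what is proved, stated in full; the proofs are below) =====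
def Claim_equal_makeProfiles : Prop := ∀ (kerning : List (String × String × Int)), Dom_makeProfiles kerning → Spec_makeProfiles kerning (makeProfiles kerning)

-- ===== LEMMAS AND PROOFS =====

-- Python's strict tuple order on pairs, and its reflexive closure.
def ltB (a b : String × Int) : Prop := a.1 < b.1 ∨ (a.1 = b.1 ∧ a.2 < b.2)
def leB (a b : String × Int) : Prop := a.1 < b.1 ∨ (a.1 = b.1 ∧ a.2 ≤ b.2)

theorem ltB_trans {a b c : String × Int} (h1 : ltB a b) (h2 : ltB b c) : ltB a c := by
  rcases h1 with h1 | ⟨e1, h1⟩ <;> rcases h2 with h2 | ⟨e2, h2⟩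
  · exact Or.inl (lt_trans h1 h2)
  · exact Or.inl (e2 ▸ h1)
  · exact Or.inl (e1 ▸ h2)
  · exact Or.inr ⟨e1.trans e2, lt_trans h1 h2⟩

theorem leB_trans {a b c : String × Int} (h1 : leB a b) (h2 : leB b c) : leB a c := by
  rcases h1 with h1 | ⟨e1, h1⟩ <;> rcases h2 with h2 | ⟨e2, h2⟩
  · exact Or.inl (lt_trans h1 h2)
  · exact Or.inl (e2 ▸ h1)
  · exact Or.inl (e1 ▸ h2)
  · exact Or.inr ⟨e1.trans e2, le_trans h1 h2⟩

theorem leB_of_ltB {a b : String × Int} (h : ltB a b) : leB a b := by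
  rcases h with h | ⟨e, h⟩
  · exact Or.inl h
  · exact Or.inr ⟨e, le_of_lt h⟩

theorem ltB_ne {a b : String × Int} (h : ltB a b) : a ≠ b := by
  rcases h with h | ⟨e, h⟩ <;> intro hab <;> subst hab
  · exact lt_irrefl _ h
  · exact lt_irrefl _ h

theorem ltB_of_leB_ne {a b : String × Int} (h : leB a b) (hne : a ≠ b) : ltB a b := by
  rcases h with h | ⟨e, h⟩
  · exact Or.inl h
  · rcases lt_or_eq_of_le h with h' | h'
    · exact Or.inr ⟨e, h'⟩
    · exact absurd (Prod.ext_iff.mpr ⟨e, h'⟩) hne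

theorem leB_antisymm {a b : String × Int} (h1 : leB a b) (h2 : leB b a) : a = b := by
  rcases h1 with h1 | ⟨e1, h1⟩ <;> rcases h2 with h2 | ⟨e2, h2⟩
  · exact absurd h2 (lt_asymm h1)
  · exact absurd h1 (e2 ▸ lt_irrefl _)
  · exact absurd h2 (e1 ▸ lt_irrefl _)
  · exact Prod.ext_iff.mpr ⟨e1, le_antisymm h1 h2⟩

theorem ltB_total {a b : String × Int} (h : ¬ ltB a b) (hne : a ≠ b) : ltB b a := by
  rcases lt_trichotomy a.1 b.1 with h1 | h1 | h1
  · exact absurd (Or.inl h1) h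
  · rcases lt_trichotomy a.2 b.2 with h2 | h2 | h2
    · exact absurd (Or.inr ⟨h1, h2⟩) h
    · exact absurd (Prod.ext_iff.mpr ⟨h1, h2⟩) hne
    · exact Or.inr ⟨h1.symm, h2⟩
  · exact Or.inl h1

theorem pairLt_iff {p q : String × Int} : pairLt p q = true ↔ ltB p q := by
  simp [pairLt, ltB]

-- characterisation of insPair
theorem mem_insPair {s : List (String × Int)} {p r : String × Int} :
    r ∈ insPair s p ↔ r = p ∨ r ∈ s := by
  induction s with
  | nil => simp [insPair]
  | cons q t ih =>
    simp only [insPair]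
    by_cases hqp : (q == p) = true
    · rw [if_pos hqp]
      have hq : q = p := by simpa using hqp
      subst hq
      simp only [List.mem_cons]
      tauto
    · rw [if_neg hqp]
      by_cases hlt : pairLt p q = true
      · rw [if_pos hlt]; simp only [List.mem_cons]
      · rw [if_neg hlt]; simp only [List.mem_cons, ih]; tauto

theorem insPair_of_mem {s : List (String × Int)} {p : String × Int}
    (hpw : s.Pairwise ltB) (hm : p ∈ s) : insPair s p = s := by
  induction s with
  | nil => cases hm
  | cons q t ih =>
    rcases List.mem_cons.mp hm with h | h
    · have hqp : (q == p) = true := by simp [h]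
      simp only [insPair]
      rw [if_pos hqp]
    · have hqp : ltB q p := (List.pairwise_cons.mp hpw).1 p h
      have hne : (q == p) ≠ true := by simpa using ltB_ne hqp
      have hnlt : ¬ pairLt p q = true := by
        rw [pairLt_iff]; intro hc
        exact ltB_ne (ltB_trans hqp hc) rfl
      simp only [insPair]
      rw [if_neg hne, if_neg hnlt, ih (List.pairwise_cons.mp hpw).2 h]

theorem insPair_perm {s : List (String × Int)} {p : String × Int}
    (hm : p ∉ s) : (insPair s p).Perm (p :: s) := by
  induction s with
  | nil => simp [insPair]
  | cons q t ih =>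
    have hne : (q == p) ≠ true := by
      intro h
      have hq : q = p := by simpa using h
      exact hm (hq ▸ List.mem_cons_self)
    by_cases hlt : pairLt p q = true
    · simp only [insPair]; rw [if_neg hne, if_pos hlt]
    · simp only [insPair]; rw [if_neg hne, if_neg hlt]
      have h := ih (fun h => hm (List.mem_cons_of_mem _ h))
      exact (h.cons q).trans (List.Perm.swap p q t)

theorem insPair_pairwise {s : List (String × Int)} {p : String × Int}
    (hpw : s.Pairwise ltB) : (insPair s p).Pairwise ltB := by
  induction s with
  | nil => simp [insPair]
  | cons q t ih =>
    rcases List.pairwise_cons.mp hpw with ⟨hq, ht⟩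
    simp only [insPair]
    by_cases hqp : (q == p) = true
    · rw [if_pos hqp]; exact hpw
    · rw [if_neg hqp]
      by_cases hlt : pairLt p q = true
      · rw [if_pos hlt]
        refine List.pairwise_cons.mpr ⟨?_, hpw⟩
        intro r hr
        rcases List.mem_cons.mp hr with h | h
        · exact h ▸ pairLt_iff.mp hlt
        · exact ltB_trans (pairLt_iff.mp hlt) (hq r h)
      · rw [if_neg hlt]
        refine List.pairwise_cons.mpr ⟨?_, ih ht⟩
        intro r hr
        rcases mem_insPair.mp hr with h | h
        · subst h
          have hne : q ≠ r := by simpa using hqp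
          exact ltB_total (fun hc => hlt (pairLt_iff.mpr hc)) (Ne.symm hne)
        · exact hq r h

-- sorted(v) for a list of pairs, as A's port computes it
def SL (xs : List (String × Int)) : List (String × Int) :=
  PySem.List.sorted2 xs Prod.fst Prod.snd false

def lexB (a b : String × Int) : Bool :=
  decide (a.1 < b.1) || (!decide (b.1 < a.1) && decide (a.2 < b.2))

theorem lexB_true_iff {a b : String × Int} : lexB a b = true ↔ ltB a b := by
  simp only [lexB, ltB, Bool.or_eq_true, Bool.and_eq_true, Bool.not_eq_true',
    decide_eq_true_eq, decide_eq_false_iff_not]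
  constructor
  · rintro (h | ⟨h1, h2⟩)
    · exact Or.inl h
    · by_cases h3 : a.1 < b.1
      · exact Or.inl h3
      · exact Or.inr ⟨le_antisymm (not_lt.mp h1) (not_lt.mp h3), h2⟩
  · rintro (h | ⟨e, h⟩)
    · exact Or.inl h
    · exact Or.inr ⟨by simp [e], h⟩

theorem lexB_false_le {a b : String × Int} (h : lexB a b = false) : leB b a := by
  simp only [lexB, Bool.or_eq_false_iff, Bool.and_eq_false_iff, Bool.not_eq_false',
    decide_eq_false_iff_not, decide_eq_true_eq] at h
  rcases h with ⟨h1, h2 | h2⟩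
  · exact Or.inl h2
  · by_cases hb : b.1 < a.1
    · exact Or.inl hb
    · exact Or.inr ⟨le_antisymm (not_lt.mp h1) (not_lt.mp hb), not_lt.mp h2⟩

theorem insertBy_lexB_pairwise (x : String × Int) (ys : List (String × Int))
    (h : ys.Pairwise leB) : (PySem.List.insertBy lexB x ys).Pairwise leB := by
  induction ys with
  | nil => simp [PySem.List.insertBy]
  | cons y t ih =>
    rcases List.pairwise_cons.mp h with ⟨hy, ht⟩
    by_cases hb : lexB x y = true
    · simp only [PySem.List.insertBy]
      rw [if_pos hb]
      refine List.pairwise_cons.mpr ⟨?_, h⟩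
      intro r hr
      rcases List.mem_cons.mp hr with h' | h'
      · exact h' ▸ leB_of_ltB (lexB_true_iff.mp hb)
      · exact leB_trans (leB_of_ltB (lexB_true_iff.mp hb)) (hy r h')
    · simp only [PySem.List.insertBy]
      rw [if_neg hb]
      refine List.pairwise_cons.mpr ⟨?_, ih ht⟩
      intro r hr
      rcases (PySem.List.insertBy_mem_iff _ _ _ _).mp hr with h' | h'
      · exact h' ▸ lexB_false_le (Bool.eq_false_iff.mpr hb)
      · exact hy r h'

theorem SL_perm (xs : List (String × Int)) : (SL xs).Perm xs :=
  PySem.List.sorted2_perm xs Prod.fst Prod.snd false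

theorem SL_pairwise (xs : List (String × Int)) : (SL xs).Pairwise leB := by
  have e : SL xs = xs.foldl (fun acc x => PySem.List.insertBy lexB x acc) [] := rfl
  rw [e]
  suffices h : ∀ (l : List (String × Int)) (acc : List (String × Int)), acc.Pairwise leB →
      (l.foldl (fun acc x => PySem.List.insertBy lexB x acc) acc).Pairwise leB from
    h xs [] (by simp)
  intro l
  induction l with
  | nil => exact fun acc h => h
  | cons a t ih => exact fun acc h => ih _ (insertBy_lexB_pairwise a acc h)

theorem SL_eq_of {ys xs : List (String × Int)} (hp : ys.Perm xs) (hpw : ys.Pairwise ltB) :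
    SL xs = ys :=
  List.Perm.eq_of_pairwise (fun _ _ _ _ h1 h2 => leB_antisymm h1 h2)
    (SL_pairwise xs) (hpw.imp (fun h => leB_of_ltB h)) ((SL_perm xs).trans hp.symm)

theorem SL_pairwise_ltB {xs : List (String × Int)} (hnd : xs.Nodup) :
    (SL xs).Pairwise ltB := by
  have h1 := SL_pairwise xs
  have h2 : (SL xs).Nodup := (SL_perm xs).nodup_iff.mpr hnd
  exact (h1.and h2).imp (fun ⟨ha, hb⟩ => ltB_of_leB_ne ha hb)

theorem nodup_set_add {s : PySem.Set (String × Int)} {p : String × Int}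
    (hnd : s.Nodup) : (PySem.Set.add s p).Nodup := by
  by_cases hm : p ∈ s
  · simpa [PySem.Set.add, PySem.Set.contains_eq_decide, hm] using hnd
  · simp only [PySem.Set.add, PySem.Set.contains_eq_decide, hm, decide_false]
    simp [List.nodup_append, hnd]
    intro a b hab e
    exact hm (e ▸ hab)

-- the central fact: sorting the set after adding = ordered insertion into the sorted set
theorem SL_add {old : PySem.Set (String × Int)} {p : String × Int}
    (hnd : old.Nodup) : SL (PySem.Set.add old p) = insPair (SL old) p := by
  have hpw : (SL old).Pairwise ltB := SL_pairwise_ltB hnd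
  by_cases hm : p ∈ old
  · have e : PySem.Set.add old p = old := by
      simp [PySem.Set.add, hm]
    rw [e, insPair_of_mem hpw ((SL_perm old).mem_iff.mpr hm)]
  · have e : PySem.Set.add old p = old ++ [p] := by
      simp [PySem.Set.add, hm]
    rw [e]
    refine SL_eq_of ?_ (insPair_pairwise hpw)
    have hms : p ∉ SL old := fun h => hm ((SL_perm old).mem_iff.mp h)
    exact (insPair_perm hms).trans (((SL_perm old).cons p).trans (List.perm_append_singleton p old).symm)

-- dict-level abstraction used only in the proofs
def stepA (d : PySem.Dict String (PySem.Set (String × Int))) (y : String × (String × Int)) :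
    PySem.Dict String (PySem.Set (String × Int)) :=
  (if d.contains y.1 then d else d.insert y.1 PySem.Set.empty).modify y.1 PySem.Set.empty
    (fun s => PySem.Set.add s y.2)

def stepB (d : PySem.Dict String (List (String × Int))) (y : String × (String × Int)) :
    PySem.Dict String (List (String × Int)) :=
  d.insert y.1 (insPair (d.getD y.1 []) y.2)

def InvD (d : PySem.Dict String (PySem.Set (String × Int))) : Prop :=
  d.keys.Nodup ∧ ∀ kv ∈ d.items, (kv.2 : List (String × Int)).Nodup

theorem keys_sortValuesA (d : PySem.Dict String (PySem.Set (String × Int))) :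
    (sortValuesA d).keys = d.keys := by
  simp [sortValuesA, PySem.Dict.keys]

theorem contains_sortValuesA (d : PySem.Dict String (PySem.Set (String × Int))) (k : String) :
    (sortValuesA d).contains k = d.contains k := by
  rw [PySem.Dict.contains_eq_decide_mem_keys, PySem.Dict.contains_eq_decide_mem_keys,
    keys_sortValuesA]

theorem stepAB (d : PySem.Dict String (PySem.Set (String × Int))) (y : String × (String × Int))
    (hinv : InvD d) :
    sortValuesA (stepA d y) = stepB (sortValuesA d) y ∧ InvD (stepA d y) := by
  obtain ⟨k, p⟩ := y
  obtain ⟨hknd, hvals⟩ := hinv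
  by_cases hc : d.contains k = true
  · -- key already present
    obtain ⟨old, hold⟩ : ∃ v, (k, v) ∈ d.items := by
      have hk : k ∈ d.keys := (PySem.Dict.contains_iff_mem_keys d k).mp hc
      simp only [PySem.Dict.keys] at hk
      rcases List.mem_map.mp hk with ⟨q, hq, hq1⟩
      exact ⟨q.2, by rw [← hq1]; simpa using hq⟩
    have holdnd : old.Nodup := hvals _ hold
    have hgetD : d.getD k PySem.Set.empty = old := PySem.Dict.getD_of_mem_items d hold hknd _
    have hgetD0 : d.getD k ([] : PySem.Set (String × Int)) = old :=
      PySem.Dict.getD_of_mem_items d hold hknd _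
    have hSold : (k, SL old) ∈ (sortValuesA d).items :=
      List.mem_map.mpr ⟨(k, old), hold, rfl⟩
    have hndS : (sortValuesA d).keys.Nodup := by rw [keys_sortValuesA]; exact hknd
    have hgetDS : (sortValuesA d).getD k [] = SL old :=
      PySem.Dict.getD_of_mem_items _ hSold hndS _
    have hstepA : stepA d (k, p) = d.insert k (PySem.Set.add old p) := by
      simp [stepA, hc, PySem.Dict.modify, hgetD0]
    refine ⟨?_, ?_, ?_⟩
    · apply PySem.Dict.ext
      rw [hstepA]
      show ((d.insert k (PySem.Set.add old p)).items.map
          (fun kv => (kv.1, PySem.List.sorted2 kv.2 Prod.fst Prod.snd false))) = _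
      rw [PySem.Dict.items_insert_of_contains _ _ hc]
      simp only [stepB, hgetDS]
      rw [PySem.Dict.items_insert_of_contains _ _ (by rw [contains_sortValuesA]; exact hc)]
      show _ = ((d.items.map (fun kv => (kv.1, PySem.List.sorted2 kv.2 Prod.fst Prod.snd false))).map
          (fun q => if q.1 == k then (k, insPair (SL old) p) else q))
      rw [List.map_map, List.map_map]
      apply List.map_congr_left
      intro q hq
      by_cases hqk : (q.1 == k) = true
      · have hqk' : q.1 = k := by simpa using hqk
        have key := SL_add (old := old) (p := p) holdnd
        simp only [SL] at key
        simp [Function.comp_apply, hqk', key, SL]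
      · simp only [Function.comp_apply]
        rw [if_neg hqk, if_neg hqk]
    · rw [hstepA, PySem.Dict.keys_insert_of_contains d _ hc]
      exact hknd
    · intro kv hkv
      rw [hstepA, PySem.Dict.items_insert_of_contains _ _ hc] at hkv
      rcases List.mem_map.mp hkv with ⟨q, hq, hkveq⟩
      by_cases hqk : (q.1 == k) = true
      · rw [if_pos hqk] at hkveq
        rw [← hkveq]
        exact nodup_set_add holdnd
      · rw [if_neg hqk] at hkveq
        exact hkveq ▸ hvals q hq
  · -- fresh key
    have hc' : d.contains k = false := Bool.eq_false_iff.mpr hc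
    have hstepA : stepA d (k, p) = d.insert k [p] := by
      simp only [stepA, hc', if_false, Bool.false_eq_true, PySem.Dict.modify,
        PySem.Dict.getD_insert_self, PySem.Dict.insert_insert_self]
      rfl
    have hcS : (sortValuesA d).contains k = false := by rw [contains_sortValuesA]; exact hc'
    have hkm : k ∉ d.keys := fun h => hc ((PySem.Dict.contains_iff_mem_keys d k).mpr h)
    refine ⟨?_, ?_, ?_⟩
    · apply PySem.Dict.ext
      rw [hstepA]
      show ((d.insert k [p]).items.map
          (fun kv => (kv.1, PySem.List.sorted2 kv.2 Prod.fst Prod.snd false))) = _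
      rw [PySem.Dict.items_insert_of_not_contains _ _ hc']
      simp only [stepB]
      rw [PySem.Dict.getD_of_not_contains _ _ hcS,
        PySem.Dict.items_insert_of_not_contains _ _ hcS]
      rw [List.map_append]
      rfl
    · rw [hstepA, PySem.Dict.keys_insert_of_not_contains _ _ hc']
      simp [List.nodup_append, hknd]
      exact fun a ha e => hkm (e ▸ ha)
    · intro kv hkv
      rw [hstepA, PySem.Dict.items_insert_of_not_contains _ _ hc'] at hkv
      rcases List.mem_append.mp hkv with h | h
      · exact hvals kv h
      · simp only [List.mem_singleton] at h
        subst h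
        simp
theorem foldAB (l : List (String × (String × Int))) (d : PySem.Dict String (PySem.Set (String × Int)))
    (hinv : InvD d) :
    sortValuesA (l.foldl stepA d) = l.foldl stepB (sortValuesA d) ∧ InvD (l.foldl stepA d) := by
  induction l generalizing d with
  | nil => exact ⟨rfl, hinv⟩
  | cons y t ih =>
    rcases stepAB d y hinv with ⟨h1, h2⟩
    rcases ih (stepA d y) h2 with ⟨h3, h4⟩
    refine ⟨?_, h4⟩
    simpa [List.foldl_cons, h1] using h3

theorem profile_eq (l : List (String × (String × Int))) :
    sortValuesA (l.foldl stepA PySem.Dict.empty) = l.foldl stepB PySem.Dict.empty := by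
  have hinv : InvD PySem.Dict.empty := ⟨List.nodup_nil, by intro kv h; cases h⟩
  have h := (foldAB l PySem.Dict.empty hinv).1
  simpa using h

-- ===== VERDICT (by name: the statement is the Claim_ definition above) =====
theorem makeProfiles_spec : Claim_equal_makeProfiles := by
  intro kerning _
  unfold Spec_makeProfiles
  have hsplit : kerning.foldl
      (fun acc x =>
        ((if acc.1.contains x.1 then acc.1 else acc.1.insert x.1 PySem.Set.empty).modify
            x.1 PySem.Set.empty (fun s => PySem.Set.add s (x.2.1, x.2.2)),
         (if acc.2.contains x.2.1 then acc.2 else acc.2.insert x.2.1 PySem.Set.empty).modify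
            x.2.1 PySem.Set.empty (fun s => PySem.Set.add s (x.1, x.2.2))))
      (PySem.Dict.empty, PySem.Dict.empty)
      = (kerning.foldl (fun d x => stepA d (x.1, (x.2.1, x.2.2))) PySem.Dict.empty,
         kerning.foldl (fun d x => stepA d (x.2.1, (x.1, x.2.2))) PySem.Dict.empty) := by
    exact PySem.List.foldl_prod_mk (fun d x => stepA d (x.1, (x.2.1, x.2.2)))
      (fun d x => stepA d (x.2.1, (x.1, x.2.2))) kerning PySem.Dict.empty PySem.Dict.empty
  have e1 : kerning.foldl (fun d x => stepA d (x.1, (x.2.1, x.2.2))) PySem.Dict.empty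
      = (kerning.map (fun x => (x.1, (x.2.1, x.2.2)))).foldl stepA PySem.Dict.empty := by
    rw [List.foldl_map]
  have e2 : kerning.foldl (fun d x => stepA d (x.2.1, (x.1, x.2.2))) PySem.Dict.empty
      = (kerning.map (fun x => (x.2.1, (x.1, x.2.2)))).foldl stepA PySem.Dict.empty := by
    rw [List.foldl_map]
  have b1 : profileB kerning
      = (kerning.map (fun x => (x.1, (x.2.1, x.2.2)))).foldl stepB PySem.Dict.empty := by
    rw [List.foldl_map]; rfl
  have b2 : profileB (kerning.map (fun t => (t.2.1, t.1, t.2.2)))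
      = (kerning.map (fun x => (x.2.1, (x.1, x.2.2)))).foldl stepB PySem.Dict.empty := by
    unfold profileB
    rw [List.foldl_map, List.foldl_map]
    rfl
  show makeProfiles kerning = makeProfiles_alt kerning
  unfold makeProfiles makeProfiles_alt
  simp only [hsplit, e1, e2, b1, b2]
  rw [profile_eq, profile_eq]
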